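-- pv_equiv track=rewrite | github.com/wzj042/sooon-about-dev | app/sooon-battle-simulate/script/merge_json.py | detect_contained_options
-- ===== SOURCE A (Python) =====
-- from typing import Dict, List, Any, Tuple
--
-- def detect_contained_options(options: List[str]) -> bool:
--     """
--     检测是否存在单选项包含其余选项文本的情况
--
--     Args:
--         options: 选项列表
--
--     Returns:
--         bool: 是否存在包含情况
--     """
--     if len(options) < 2:
--         return False
--
--     for i, option1 in enumerate(options):
--         for j, option2 in enumerate(options):
--             if i != j and option1 in option2 and option1 != option2:
--                 return True
--     return False
-- ===== SOURCE B (Python) =====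
-- def detect_contained_options(options):
--     """Length-sorted copy, then each option is compared only against the
--     longer-or-equal options after it (a distinct substring must be strictly
--     shorter, so only shorter-into-longer comparisons matter)."""
--     if len(options) < 2:
--         return False
--     ordered = sorted(options, key=len)
--     for i, shorter in enumerate(ordered):
--         for longer in ordered[i + 1:]:
--             if shorter != longer and shorter in longer:
--                 return True
--     return False
-- ===== Notes on version B (the rewrite author's own statement) =====
-- stated objective: faster
-- what changed: Instead of A's full n*n double scan over all ordered index pairs, B sorts a copy by length once and makes a single triangular pass comparing each option only against the strictly-later (longer-or-equal) entries, relying on the fact that a distinct substring must be strictly shorter.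
import Mathlib
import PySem

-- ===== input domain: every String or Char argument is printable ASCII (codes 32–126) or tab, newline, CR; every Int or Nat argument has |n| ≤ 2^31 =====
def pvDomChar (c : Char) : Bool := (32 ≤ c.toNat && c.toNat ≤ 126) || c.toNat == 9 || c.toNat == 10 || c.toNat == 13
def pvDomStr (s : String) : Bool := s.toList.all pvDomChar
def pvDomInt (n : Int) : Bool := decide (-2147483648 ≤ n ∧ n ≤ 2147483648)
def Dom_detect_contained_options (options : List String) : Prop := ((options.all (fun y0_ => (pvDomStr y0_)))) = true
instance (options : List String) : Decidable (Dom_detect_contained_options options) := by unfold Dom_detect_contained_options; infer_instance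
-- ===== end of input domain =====

-- B sorts a copy by length once and makes a single triangular pass (each option
-- against the strictly-later, longer-or-equal entries) instead of A's full
-- double scan over all ordered index pairs; same return value everywhere.

-- ===== PORT A =====
def detect_contained_options (options : List String) : Bool :=
  if options.length < 2 then false
  else
    (PySem.List.enumerate options 0).any (fun p =>
      (PySem.List.enumerate options 0).any (fun q =>
        p.1 != q.1 && PySem.Str.isIn p.2 q.2 && p.2 != q.2))

-- ===== PORT B =====
-- inner loop: 'for longer in ordered[i+1:]'
def pvScanLater (shorter : String) (later : List String) : Bool :=
  later.any (fun longer => shorter != longer && PySem.Str.isIn shorter longer)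

-- outer loop over the sorted list, each element paired with its strictly-later entries
def pvTriangular : List String → Bool
  | [] => false
  | shorter :: rest => pvScanLater shorter rest || pvTriangular rest

def detect_contained_options_alt (options : List String) : Bool :=
  if options.length < 2 then false
  else pvTriangular (PySem.List.sorted options (fun s => PySem.Str.len s) false)

-- ===== PRECONDITION & SPEC =====
def Spec_detect_contained_options (options : List String) (out : Bool) : Prop := out = detect_contained_options_alt options
instance (options : List String) (out : Bool) : Decidable (Spec_detect_contained_options options out) := by unfold Spec_detect_contained_options; infer_instance

-- ===== CLAIM (what is proved, stated in full; the proofs are below) =====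
def Claim_equal_detect_contained_options : Prop := ∀ (options : List String), Dom_detect_contained_options options → Spec_detect_contained_options options (detect_contained_options options)

-- ===== LEMMAS AND PROOFS =====

-- the common characterisation: some option is a proper substring of another option
def pvProp (options : List String) : Prop :=
  ∃ x ∈ options, ∃ y ∈ options, x ≠ y ∧ x.toList <:+: y.toList

lemma pvProp_length (options : List String) (h : pvProp options) : 2 ≤ options.length := by
  obtain ⟨x, hx, y, hy, hne, -⟩ := h
  match options, hx, hy with
  | [a], hx, hy =>
    simp at hx hy; subst hx; subst hy; exact absurd rfl hne
  | a :: b :: t, _, _ => simp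

lemma pvA_iff (options : List String) :
    detect_contained_options options = true ↔ pvProp options := by
  unfold detect_contained_options
  split
  · next h =>
    constructor
    · intro hfalse; exact absurd hfalse (by simp)
    · intro hp; exact absurd (pvProp_length options hp) (by omega)
  · simp only [List.any_eq_true, PySem.List.mem_enumerate_iff, Bool.and_eq_true, bne_iff_ne,
      PySem.Str.isIn_iff_infix]
    constructor
    · rintro ⟨p, ⟨i, hi, rfl⟩, q, ⟨j, hj, rfl⟩, ⟨hij, hin⟩, hne⟩
      exact ⟨options[i], List.getElem_mem hi, options[j], List.getElem_mem hj, hne, hin⟩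
    · rintro ⟨x, hx, y, hy, hne, hin⟩
      obtain ⟨i, hi, rfl⟩ := List.getElem_of_mem hx
      obtain ⟨j, hj, rfl⟩ := List.getElem_of_mem hy
      refine ⟨(0 + (i : Int), options[i]), ⟨i, hi, rfl⟩, (0 + (j : Int), options[j]), ⟨j, hj, rfl⟩, ⟨?_, hin⟩, hne⟩
      intro hij
      have hij2 : i = j := by simpa using hij
      exact hne (by simp [hij2])

-- a distinct infix is strictly shorter
lemma pvLen_lt {x y : String} (hne : x ≠ y) (hin : x.toList <:+: y.toList) :
    x.toList.length < y.toList.length := by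
  rcases lt_or_eq_of_le hin.length_le with h | h
  · exact h
  · exact absurd (String.toList_inj.mp (hin.sublist.eq_of_length h)) hne

lemma pvTriangular_sound (L : List String) (h : pvTriangular L = true) :
    ∃ x ∈ L, ∃ y ∈ L, x ≠ y ∧ x.toList <:+: y.toList := by
  induction L with
  | nil => simp [pvTriangular] at h
  | cons a t ih =>
    rw [pvTriangular, Bool.or_eq_true] at h
    rcases h with h | h
    · obtain ⟨y, hy, hb⟩ := List.any_eq_true.mp h
      rw [Bool.and_eq_true, bne_iff_ne, PySem.Str.isIn_iff_infix] at hb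
      exact ⟨a, List.mem_cons_self, y, List.mem_cons_of_mem _ hy, hb.1, hb.2⟩
    · obtain ⟨x, hx, y, hy, hne, hin⟩ := ih h
      exact ⟨x, List.mem_cons_of_mem _ hx, y, List.mem_cons_of_mem _ hy, hne, hin⟩

lemma pvTriangular_complete {x y : String}
    (hlen : x.toList.length < y.toList.length) (hin : x.toList <:+: y.toList) :
    ∀ L : List String, L.Pairwise (fun a b => PySem.Str.len a ≤ PySem.Str.len b) →
      x ∈ L → y ∈ L → pvTriangular L = true := by
  intro L
  induction L with
  | nil => intro _ hx _; simp at hx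
  | cons a t ih =>
    intro hp hx hy
    have hlenab : ∀ b ∈ t, PySem.Str.len a ≤ PySem.Str.len b := (List.pairwise_cons.mp hp).1
    have hpt := (List.pairwise_cons.mp hp).2
    rw [pvTriangular, Bool.or_eq_true]
    have hyt : y ∈ t := by
      rcases List.mem_cons.mp hy with hy' | hy'
      · exfalso
        subst hy'
        have hxt : x ∈ t := by
          rcases List.mem_cons.mp hx with hx' | hx'
          -- x = a = y is impossible: the lengths differ
          · subst hx'; omega
          · exact hx'
        have hle := hlenab x hxt
        simp only [PySem.Str.len] at hle
        omega
      · exact hy'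
    rcases List.mem_cons.mp hx with hx' | hx'
    · subst hx'
      left
      refine List.any_eq_true.mpr ⟨y, hyt, ?_⟩
      rw [Bool.and_eq_true, bne_iff_ne, PySem.Str.isIn_iff_infix]
      exact ⟨fun h => by subst h; omega, hin⟩
    · exact Or.inr (ih hpt hx' hyt)

lemma pvB_iff (options : List String) :
    detect_contained_options_alt options = true ↔ pvProp options := by
  unfold detect_contained_options_alt
  split
  · next h =>
    constructor
    · intro hfalse; exact absurd hfalse (by simp)
    · intro hp; exact absurd (pvProp_length options hp) (by omega)
  · constructor
    · intro h
      obtain ⟨x, hx, y, hy, hne, hin⟩ := pvTriangular_sound _ h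
      rw [PySem.List.mem_sorted] at hx hy
      exact ⟨x, hx, y, hy, hne, hin⟩
    · rintro ⟨x, hx, y, hy, hne, hin⟩
      exact pvTriangular_complete (pvLen_lt hne hin) hin _
        (PySem.List.sorted_pairwise options (fun s => PySem.Str.len s))
        ((PySem.List.mem_sorted _ _ _ _).mpr hx) ((PySem.List.mem_sorted _ _ _ _).mpr hy)

-- ===== VERDICT (by name: the statement is the Claim_ definition above) =====
theorem detect_contained_options_spec : Claim_equal_detect_contained_options := by
  intro options _
  unfold Spec_detect_contained_options
  by_cases h : pvProp options
  · rw [(pvA_iff options).mpr h, ((pvB_iff options).mpr h)]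
  · have ha := (pvA_iff options).not.mpr h
    have hb := (pvB_iff options).not.mpr h
    simp only [Bool.not_eq_true] at ha hb
    rw [ha, hb]
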